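-- pv_equiv track=rewrite | github.com/B1boid/ML_LAB_ITMO | codeforces/J.py | pool
-- ===== SOURCE A (Python) =====
-- def pool(network, n, d, s):
--     res = [[[0 for _ in range((n + s - 1) // s)] for _ in range((n + s - 1) // s)] for _ in range(d)]
--     d_res = [[[0 for _ in range((n + s - 1) // s)] for _ in range((n + s - 1) // s)] for _ in range(d)]
--     for dim in range(d):
--         for i in range((n + s - 1) // s):
--             for j in range((n + s - 1) // s):
--                 mx, d_mx = None, None
--                 for i_r in range(i * s, (i + 1) * s):
--                     for j_r in range(j * s, (j + 1) * s):
--                         if i_r < n and j_r < n: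
--                             if mx is None or network[dim][i_r][j_r] > mx:
--                                 mx = network[dim][i_r][j_r]
--                                 d_mx = [(i_r, j_r)]
--                             elif network[dim][i_r][j_r] == mx:
--                                 d_mx.append((i_r, j_r))
--                 res[dim][i][j] = mx
--                 d_res[dim][i][j] = d_mx
--     return res, d_res
-- ===== SOURCE B (Python) =====
-- def pool(network, n, d, s):
--     # Two-phase per window: compute the max over the clipped window first,
--     # then collect equal positions in row-major order; output built by comprehensions.
--     k = (n + s - 1) // s
--
--     def cells(i, j):
--         return [(i_r, j_r)
--                 for i_r in range(i * s, min((i + 1) * s, n))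
--                 for j_r in range(j * s, min((j + 1) * s, n))]
--
--     def window(dim, i, j):
--         cs = cells(i, j)
--         mx = max(network[dim][i_r][j_r] for (i_r, j_r) in cs)
--         return mx, [(i_r, j_r) for (i_r, j_r) in cs
--                     if network[dim][i_r][j_r] == mx]
--
--     res = [[[window(dim, i, j)[0] for j in range(k)] for i in range(k)]
--            for dim in range(d)]
--     d_res = [[[window(dim, i, j)[1] for j in range(k)] for i in range(k)]
--              for dim in range(d)]
--     return res, d_res
-- ===== Notes on version B (the rewrite author's own statement) =====
-- stated objective: alternative
-- what changed: A fills pre-allocated result arrays by in-place assignment while tracking max and argmax incrementally in one pass per window; B builds the outputs with comprehensions and, per window, first computes the max over the clipped cell list and then filters that list for the positions attaining it.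
-- outside the precondition, e.g. on pool([[[5]]], 1, 1, -1): A returns ([[[None]]], [[[None]]]), B raises ValueError; on pool([], -1, -1, 0): A returns ([], []), B raises ZeroDivisionError
import Mathlib
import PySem

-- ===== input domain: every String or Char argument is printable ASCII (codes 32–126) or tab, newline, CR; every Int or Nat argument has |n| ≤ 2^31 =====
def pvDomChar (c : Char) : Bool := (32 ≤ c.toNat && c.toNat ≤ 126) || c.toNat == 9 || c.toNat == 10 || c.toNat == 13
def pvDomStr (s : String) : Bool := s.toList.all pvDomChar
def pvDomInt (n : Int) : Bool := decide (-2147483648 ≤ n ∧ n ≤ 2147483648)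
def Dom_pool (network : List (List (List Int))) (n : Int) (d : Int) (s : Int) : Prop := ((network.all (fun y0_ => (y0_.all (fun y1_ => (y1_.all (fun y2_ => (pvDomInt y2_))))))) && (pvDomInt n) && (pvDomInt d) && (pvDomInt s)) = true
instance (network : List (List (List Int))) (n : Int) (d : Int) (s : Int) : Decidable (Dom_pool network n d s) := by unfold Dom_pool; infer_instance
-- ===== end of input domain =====

-- B replaces A's single-pass incremental max/argmax tracking with in-place writes by a
-- two-phase per-window decomposition: first the max over the clipped window, then a
-- filter collecting the positions attaining it; objective: alternative (not faster).

-- ===== PORT A =====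
-- network[dim][i_r][j_r]; the getD defaults are never taken inside Pre_ (out of range,
-- Python raises IndexError, which Pre_ excludes).
def cellA (network : List (List (List Int))) (dim i_r j_r : Int) : Int :=
  (PySem.List.pyGet? ((PySem.List.pyGet? ((PySem.List.pyGet? network dim).getD []) i_r).getD []) j_r).getD 0

-- the inner double loop of A computing (mx, d_mx) for one window
def innerA (network : List (List (List Int))) (n s dim i j : Int) :
    Option Int × Option (List (Int × Int)) :=
  (PySem.List.pyRange (i * s) ((i + 1) * s)).foldl (fun m i_r =>
    (PySem.List.pyRange (j * s) ((j + 1) * s)).foldl (fun m j_r =>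
      if i_r < n ∧ j_r < n then
        let v := cellA network dim i_r j_r
        match m with
        | (none, _) => (some v, some [(i_r, j_r)])
        | (some mx, dm) =>
          if v > mx then (some v, some [(i_r, j_r)])
          else if v = mx then (some mx, dm.map (fun l => l ++ [(i_r, j_r)]))
          else (some mx, dm)
      else m) m) ((none, none))

-- res[dim][i][j] = v; the loop indices are nonnegative and within the shape that
-- built res, so .toNat is exact here.
def assign3 {α : Type} (xs : List (List (List α))) (dim i j : Int) (v : α) : List (List (List α)) :=
  xs.modify dim.toNat (fun p => p.modify i.toNat (fun r => r.set j.toNat v))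

-- Under Pre_ every assigned mx/d_mx is non-None, so the .getD placeholders are never
-- taken; d_res's Python placeholder 0 is rendered as [] (the cell type) and every
-- reachable cell is overwritten.
def pool (network : List (List (List Int))) (n : Int) (d : Int) (s : Int) :
    List (List (List Int)) × (List (List (List (List (Int × Int))))) :=
  let k := PySem.Int.floordiv (n + s - 1) s
  let res0 : List (List (List Int)) :=
    (PySem.List.pyRange 0 d).map (fun _ =>
      (PySem.List.pyRange 0 k).map (fun _ =>
        (PySem.List.pyRange 0 k).map (fun _ => (0 : Int))))
  let dres0 : List (List (List (List (Int × Int)))) :=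
    (PySem.List.pyRange 0 d).map (fun _ =>
      (PySem.List.pyRange 0 k).map (fun _ =>
        (PySem.List.pyRange 0 k).map (fun _ => ([] : List (Int × Int)))))
  (PySem.List.pyRange 0 d).foldl (fun st dim =>
    (PySem.List.pyRange 0 k).foldl (fun st i =>
      (PySem.List.pyRange 0 k).foldl (fun st j =>
        (assign3 st.1 dim i j ((innerA network n s dim i j).1.getD 0),
         assign3 st.2 dim i j ((innerA network n s dim i j).2.getD []))) st) st)
    (res0, dres0)

-- ===== PORT B =====
def cellB (network : List (List (List Int))) (dim i_r j_r : Int) : Int :=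
  (PySem.List.pyGet? ((PySem.List.pyGet? ((PySem.List.pyGet? network dim).getD []) i_r).getD []) j_r).getD 0

-- row-major list of the valid cells of window (i, j)
def cellsB (n s i j : Int) : List (Int × Int) :=
  (PySem.List.pyRange (i * s) (min ((i + 1) * s) n)).flatMap (fun i_r =>
    (PySem.List.pyRange (j * s) (min ((j + 1) * s) n)).map (fun j_r => (i_r, j_r)))

-- (window max, positions attaining it); Python's max raises on an empty window —
-- inside Pre_ every window is nonempty, so the .getD 0 is never taken.
def windowB (network : List (List (List Int))) (n s dim i j : Int) : Int × List (Int × Int) :=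
  let cs := cellsB n s i j
  let mx := (PySem.List.max? (cs.map (fun c => cellB network dim c.1 c.2)) (fun x => x)).getD 0
  (mx, cs.filter (fun c => cellB network dim c.1 c.2 == mx))

def pool_alt (network : List (List (List Int))) (n : Int) (d : Int) (s : Int) :
    List (List (List Int)) × (List (List (List (List (Int × Int))))) :=
  let k := PySem.Int.floordiv (n + s - 1) s
  ((PySem.List.pyRange 0 d).map (fun dim =>
      (PySem.List.pyRange 0 k).map (fun i =>
        (PySem.List.pyRange 0 k).map (fun j => (windowB network n s dim i j).1))),
   (PySem.List.pyRange 0 d).map (fun dim =>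
      (PySem.List.pyRange 0 k).map (fun i =>
        (PySem.List.pyRange 0 k).map (fun j => (windowB network n s dim i j).2))))

-- ===== PRECONDITION & SPEC =====
-- Pre_ excludes exactly the inputs where A raises or leaves the type, or B raises:
-- s = 0 with 0 < d (A: ZeroDivisionError; for d ≤ 0 A never divides but B does, so B
-- raises there); s < 0 with a positive window count and 0 < d (A stores None — not an
-- int — in every window); and, when windows exist and 0 < d, networks with fewer than
-- d planes or with planes/rows shorter than n (A: IndexError).
def Pre_pool (network : List (List (List Int))) (n : Int) (d : Int) (s : Int) : Prop :=
  s ≠ 0 ∧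
  (s < 0 → PySem.Int.floordiv (n + s - 1) s ≤ 0 ∨ d ≤ 0) ∧
  (0 < PySem.Int.floordiv (n + s - 1) s → 0 < d →
    (d ≤ (network.length : Int) ∧
     ∀ p ∈ network.take d.toNat, n ≤ (p.length : Int) ∧
       ∀ r ∈ p.take n.toNat, n ≤ (r.length : Int)))
instance (network : List (List (List Int))) (n : Int) (d : Int) (s : Int) : Decidable (Pre_pool network n d s) := by unfold Pre_pool; infer_instance

def pvWitness_pool : List (List (List Int)) × Int × Int × Int :=
  ([[[1, 2], [3, 1]], [[5, 5], [5, 5]]], 2, 2, 2)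

def Spec_pool (network : List (List (List Int))) (n : Int) (d : Int) (s : Int) (out : List (List (List Int)) × (List (List (List (List (Int × Int)))))) : Prop := out = pool_alt network n d s
instance (network : List (List (List Int))) (n : Int) (d : Int) (s : Int) (out : List (List (List Int)) × (List (List (List (List (Int × Int)))))) : Decidable (Spec_pool network n d s out) := by unfold Spec_pool; infer_instance

-- ===== CLAIM (what is proved, stated in full; the proofs are below) =====
def Claim_equal_pool : Prop := ∀ (network : List (List (List Int))) (n : Int) (d : Int) (s : Int), Dom_pool network n d s → Pre_pool network n d s → Spec_pool network n d s (pool network n d s)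

-- ===== LEMMAS AND PROOFS =====
theorem pvPyRange_eq (a b : Int) :
    PySem.List.pyRange a b = (List.range (b - a).toNat).map (fun t : Nat => a + (t : Int)) := by
  rcases lt_or_ge a b with h | h
  · simp only [PySem.List.pyRange]
    norm_num [h]
  · have h1 : (b - a).toNat = 0 := by omega
    simp only [PySem.List.pyRange]
    norm_num [not_lt.mpr h, h1]

theorem pvRange_filter_lt (m c : Nat) :
    (List.range m).filter (fun t => decide (t < c)) = List.range (min m c) := by
  induction m with
  | zero => simp
  | succ m ih =>
    rw [List.range_succ, List.filter_append, ih]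
    by_cases h : m < c
    · have h1 : min m c = m := by omega
      have h2 : min (m + 1) c = m + 1 := by omega
      simp [h, h1, List.range_succ]
    · have h1 : min m c = c := by omega
      have h2 : min (m + 1) c = c := by omega
      simp [h, h1, h2]

theorem pvPyRange_filter_lt (a b nn : Int) (ha : a ≤ nn) :
    (PySem.List.pyRange a b).filter (fun x => decide (x < nn)) =
      PySem.List.pyRange a (min b nn) := by
  rw [pvPyRange_eq, pvPyRange_eq, List.filter_map]
  have hcongr : ∀ t ∈ List.range (b - a).toNat,
      ((fun x => decide (x < nn)) ∘ (fun t : Nat => a + (t : Int))) t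
        = (fun t : Nat => decide (t < (nn - a).toNat)) t := by
    intro t _
    simp only [Function.comp]
    by_cases h : a + (t : Int) < nn
    · have : t < (nn - a).toNat := by omega
      simp [h, this]
    · have : ¬ t < (nn - a).toNat := by omega
      simp [h, this]
  rw [List.filter_congr hcongr, pvRange_filter_lt]
  have : (min b nn - a).toNat = min ((b - a).toNat) ((nn - a).toNat) := by omega
  rw [this]

theorem pvPyRange_empty {a b : Int} (h : b ≤ a) : PySem.List.pyRange a b = [] := by
  rw [pvPyRange_eq]
  have : (b - a).toNat = 0 := by omega
  simp [this]

theorem pvModify_modify {α : Type} (l : List α) (i : Nat) (f g : α → α) :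
    (l.modify i f).modify i g = l.modify i (fun x => g (f x)) := by
  apply List.ext_getElem
  · simp
  · intro j h1 h2
    simp only [List.getElem_modify]
    split_ifs with h <;> rfl

theorem pvFoldl_modify_const {α β : Type} (l : List β) (k : Nat) (H : α → β → α)
    (init : List α) :
    l.foldl (fun acc x => acc.modify k (fun e => H e x)) init
      = init.modify k (fun e => l.foldl H e) := by
  induction l generalizing init with
  | nil =>
    apply List.ext_getElem
    · simp
    · intro j h1 h2
      simp [List.getElem_modify]
  | cons x l ih => rw [List.foldl_cons, ih, pvModify_modify]; rfl

theorem pvFoldl_modify_range_length {α : Type} (m : Nat) (F : Nat → α → α) (xs : List α) :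
    ((List.range m).foldl (fun acc t => acc.modify t (F t)) xs).length = xs.length := by
  induction m generalizing xs with
  | zero => simp
  | succ m ih => rw [List.range_succ, List.foldl_append]; simp [ih]

theorem pvFoldl_modify_range_getElem {α : Type} (m : Nat) (F : Nat → α → α) (xs : List α)
    (j : Nat) (hj : j < xs.length) :
    ((List.range m).foldl (fun acc t => acc.modify t (F t)) xs)[j]'
        (by rw [pvFoldl_modify_range_length]; exact hj)
      = if j < m then F j (xs[j]'hj) else xs[j]'hj := by
  induction m with
  | zero => simp
  | succ m ih =>
    simp only [List.range_succ, List.foldl_append, List.foldl_cons, List.foldl_nil,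
      List.getElem_modify, ih]
    by_cases h : m = j
    · subst h
      simp
    · have h2 : (j < m + 1) ↔ (j < m) := by omega
      simp [h, h2]

def pvStep (v : Int × Int → Int) (m : Option Int × Option (List (Int × Int)))
    (c : Int × Int) : Option Int × Option (List (Int × Int)) :=
  match m with
  | (none, _) => (some (v c), some [c])
  | (some mx, dm) =>
    if v c > mx then (some (v c), some [c])
    else if v c = mx then (some mx, dm.map (fun l => l ++ [c]))
    else (some mx, dm)

def pvMx (v : Int × Int → Int) (cs : List (Int × Int)) : Int :=
  (PySem.List.max? (cs.map v) (fun x => x)).getD 0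

theorem pvMax?_append_single (l : List Int) (x : Int) (hl : l ≠ []) :
    PySem.List.max? (l ++ [x]) (fun y => y)
      = some (max ((PySem.List.max? l (fun y => y)).getD 0) x) := by
  obtain ⟨a, t, rfl⟩ := List.exists_cons_of_ne_nil hl
  rw [List.cons_append, PySem.List.max?_id_cons, PySem.List.max?_id_cons]
  simp [List.foldl_append]

theorem pvFoldF (v : Int × Int → Int) (cs : List (Int × Int)) (hcs : cs ≠ []) :
    cs.foldl (pvStep v) (none, none)
      = (some (pvMx v cs), some (cs.filter (fun c => v c == pvMx v cs))) := by
  induction cs using List.reverseRecOn with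
  | nil => exact absurd rfl hcs
  | append_singleton l c ih =>
    rcases eq_or_ne l [] with rfl | hl
    · simp only [List.nil_append, List.foldl_cons, List.foldl_nil]
      have hmx : pvMx v [c] = v c := by
        simp [pvMx, PySem.List.max?_id_cons]
      rw [hmx]
      simp [pvStep]
    · rw [List.foldl_append, ih hl, List.foldl_cons, List.foldl_nil]
      have hmap : l.map v ≠ [] := by simp [hl]
      obtain ⟨M, hM⟩ : ∃ M, PySem.List.max? (l.map v) (fun y => y) = some M := by
        rcases h : PySem.List.max? (l.map v) (fun y => y) with _ | M
        · rw [PySem.List.max?_eq_none_iff] at h; exact absurd h hmap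
        · exact ⟨M, rfl⟩
      have hMx : pvMx v l = M := by simp [pvMx, hM]
      have hbound : ∀ p ∈ l, v p ≤ M := by
        intro p hp
        have := PySem.List.max?_isMax hM (v p) (List.mem_map_of_mem hp)
        simpa using this
      have hMx' : pvMx v (l ++ [c]) = max M (v c) := by
        simp only [pvMx, List.map_append, List.map_cons, List.map_nil]
        rw [pvMax?_append_single _ _ hmap, hM]
        simp
      rw [hMx, hMx']
      simp only [pvStep]
      rcases lt_trichotomy M (v c) with hlt | heq | hgt
      · have h1 : v c > M := hlt
        have hmaxeq : max M (v c) = v c := by omega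
        have hfl : l.filter (fun p => v p == v c) = [] := by
          rw [List.filter_eq_nil_iff]
          intro p hp
          have := hbound p hp
          simp only [beq_iff_eq]
          omega
        simp [h1, hmaxeq, List.filter_append, hfl]
      · have h1 : ¬ v c > M := by omega
        have h2 : v c = M := heq.symm
        have hmaxeq : max M (v c) = M := by omega
        simp [h2, List.filter_append]
      · have h1 : ¬ v c > M := by omega
        have h2 : ¬ v c = M := by omega
        have hmaxeq : max M (v c) = M := by omega
        simp [h1, h2, hmaxeq, List.filter_append]

theorem pvInnerA_eq (network : List (List (List Int))) (n s dim i j : Int)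
    (hs : 1 ≤ s) (hin : i * s < n) (hjn : j * s < n) :
    innerA network n s dim i j
      = (some (windowB network n s dim i j).1, some (windowB network n s dim i j).2) := by
  set v : Int × Int → Int := fun c => cellA network dim c.1 c.2 with hv
  have hrow : ∀ (i_r : Int), i_r < n → ∀ (m : Option Int × Option (List (Int × Int))),
      (PySem.List.pyRange (j * s) ((j + 1) * s)).foldl (fun m j_r =>
        if i_r < n ∧ j_r < n then
          let w := cellA network dim i_r j_r
          match m with
          | (none, _) => (some w, some [(i_r, j_r)])
          | (some mx, dm) =>
            if w > mx then (some w, some [(i_r, j_r)])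
            else if w = mx then (some mx, dm.map (fun l => l ++ [(i_r, j_r)]))
            else (some mx, dm)
        else m) m
      = (PySem.List.pyRange (j * s) (min ((j + 1) * s) n)).foldl
          (fun m j_r => pvStep v m (i_r, j_r)) m := by
    intro i_r hir m
    rw [PySem.List.foldl_ite_eq_foldl_filter (p := fun j_r => i_r < n ∧ j_r < n)]
    have hfe : (PySem.List.pyRange (j * s) ((j + 1) * s)).filter
          (fun x => decide (i_r < n ∧ x < n))
        = (PySem.List.pyRange (j * s) ((j + 1) * s)).filter (fun x => decide (x < n)) := by
      apply List.filter_congr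
      intro x _
      simp [hir]
    rw [hfe, pvPyRange_filter_lt _ _ _ (le_of_lt hjn)]
    apply PySem.List.foldl_congr_mem
    intro acc x _
    rfl
  have hrow0 : ∀ (i_r : Int), ¬ i_r < n → ∀ (m : Option Int × Option (List (Int × Int))),
      (PySem.List.pyRange (j * s) ((j + 1) * s)).foldl (fun m j_r =>
        if i_r < n ∧ j_r < n then
          let w := cellA network dim i_r j_r
          match m with
          | (none, _) => (some w, some [(i_r, j_r)])
          | (some mx, dm) =>
            if w > mx then (some w, some [(i_r, j_r)])
            else if w = mx then (some mx, dm.map (fun l => l ++ [(i_r, j_r)]))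
            else (some mx, dm)
        else m) m = m := by
    intro i_r hir m
    have h := PySem.List.foldl_congr_mem
      (l := PySem.List.pyRange (j * s) ((j + 1) * s)) (init := m)
      (f := fun (acc : Option Int × Option (List (Int × Int))) (j_r : Int) =>
        if i_r < n ∧ j_r < n then
          let w := cellA network dim i_r j_r
          match acc with
          | (none, _) => (some w, some [(i_r, j_r)])
          | (some mx, dm) =>
            if w > mx then (some w, some [(i_r, j_r)])
            else if w = mx then (some mx, dm.map (fun l => l ++ [(i_r, j_r)]))
            else (some mx, dm)
        else acc)
      (g := fun acc _ => acc)
      (by intro acc x _; simp [hir])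
    rw [h, PySem.List.foldl_ignore]
  have hsplit : PySem.List.pyRange (i * s) ((i + 1) * s)
      = PySem.List.pyRange (i * s) (min ((i + 1) * s) n)
        ++ PySem.List.pyRange (min ((i + 1) * s) n) ((i + 1) * s) := by
    apply PySem.List.pyRange_one_append
    · have : i * s ≤ (i + 1) * s := by nlinarith
      omega
    · omega
  have hfold : innerA network n s dim i j
      = (cellsB n s i j).foldl (pvStep v) (none, none) := by
    rw [innerA, hsplit, List.foldl_append]
    have htail : ∀ (m : Option Int × Option (List (Int × Int))),
        (PySem.List.pyRange (min ((i + 1) * s) n) ((i + 1) * s)).foldl (fun m i_r =>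
          (PySem.List.pyRange (j * s) ((j + 1) * s)).foldl (fun m j_r =>
            if i_r < n ∧ j_r < n then
              let w := cellA network dim i_r j_r
              match m with
              | (none, _) => (some w, some [(i_r, j_r)])
              | (some mx, dm) =>
                if w > mx then (some w, some [(i_r, j_r)])
                else if w = mx then (some mx, dm.map (fun l => l ++ [(i_r, j_r)]))
                else (some mx, dm)
            else m) m) m = m := by
      intro m
      rcases le_or_gt ((i + 1) * s) n with hle | hgt
      · have hm : min ((i + 1) * s) n = (i + 1) * s := by omega
        rw [hm, pvPyRange_empty (le_refl _), List.foldl_nil]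
      · have hm : min ((i + 1) * s) n = n := by omega
        rw [hm]
        have h := PySem.List.foldl_congr_mem
          (l := PySem.List.pyRange n ((i + 1) * s)) (init := m)
          (f := fun (acc : Option Int × Option (List (Int × Int))) (i_r : Int) =>
            (PySem.List.pyRange (j * s) ((j + 1) * s)).foldl (fun m j_r =>
              if i_r < n ∧ j_r < n then
                let w := cellA network dim i_r j_r
                match m with
                | (none, _) => (some w, some [(i_r, j_r)])
                | (some mx, dm) =>
                  if w > mx then (some w, some [(i_r, j_r)])
                  else if w = mx then (some mx, dm.map (fun l => l ++ [(i_r, j_r)]))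
                  else (some mx, dm)
              else m) acc)
          (g := fun acc _ => acc)
          (by
            intro acc x hx
            rw [PySem.List.mem_pyRange_one] at hx
            exact hrow0 x (by omega) acc)
        rw [h, PySem.List.foldl_ignore]
    rw [htail]
    have h := PySem.List.foldl_congr_mem
      (l := PySem.List.pyRange (i * s) (min ((i + 1) * s) n))
      (init := ((none, none) : Option Int × Option (List (Int × Int))))
      (f := fun (acc : Option Int × Option (List (Int × Int))) (i_r : Int) =>
        (PySem.List.pyRange (j * s) ((j + 1) * s)).foldl (fun m j_r =>
          if i_r < n ∧ j_r < n then
            let w := cellA network dim i_r j_r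
            match m with
            | (none, _) => (some w, some [(i_r, j_r)])
            | (some mx, dm) =>
              if w > mx then (some w, some [(i_r, j_r)])
              else if w = mx then (some mx, dm.map (fun l => l ++ [(i_r, j_r)]))
              else (some mx, dm)
          else m) acc)
      (g := fun (acc : Option Int × Option (List (Int × Int))) (i_r : Int) =>
        (PySem.List.pyRange (j * s) (min ((j + 1) * s) n)).foldl
          (fun m j_r => pvStep v m (i_r, j_r)) acc)
      (by
        intro acc x hx
        rw [PySem.List.mem_pyRange_one] at hx
        exact hrow x (by omega) acc)
    rw [h, cellsB, List.foldl_flatMap]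
    apply PySem.List.foldl_congr_mem
    intro acc x _
    rw [List.foldl_map]
  have hne : cellsB n s i j ≠ [] := by
    have hmem : ((i * s, j * s) : Int × Int) ∈ cellsB n s i j := by
      rw [cellsB, List.mem_flatMap]
      refine ⟨i * s, ?_, ?_⟩
      · rw [PySem.List.mem_pyRange_one]
        have h2 : i * s < (i + 1) * s := by nlinarith
        omega
      · rw [List.mem_map]
        refine ⟨j * s, ?_, rfl⟩
        rw [PySem.List.mem_pyRange_one]
        have h2 : j * s < (j + 1) * s := by nlinarith
        omega
    exact List.ne_nil_of_mem hmem
  rw [hfold, pvFoldF v _ hne]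
  rfl

theorem pvComponent_eq {α : Type} (D K : Int)
    (f : Int → Int → Int → α) (z : α) :
    (PySem.List.pyRange 0 D).foldl (fun st dim =>
      (PySem.List.pyRange 0 K).foldl (fun st i =>
        (PySem.List.pyRange 0 K).foldl (fun st j =>
          assign3 st dim i j (f dim i j)) st) st)
      ((PySem.List.pyRange 0 D).map (fun _ =>
        (PySem.List.pyRange 0 K).map (fun _ =>
          (PySem.List.pyRange 0 K).map (fun _ => z))))
    = (PySem.List.pyRange 0 D).map (fun dim =>
        (PySem.List.pyRange 0 K).map (fun i =>
          (PySem.List.pyRange 0 K).map (fun j => f dim i j))) := by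
  rw [pvPyRange_eq 0 D, pvPyRange_eq 0 K]
  simp only [Int.sub_zero, zero_add]
  have hj : ∀ (dim i : Int) (st : List (List (List α))),
      ((List.range K.toNat).map (fun t : Nat => (t : Int))).foldl (fun st j =>
        assign3 st dim i j (f dim i j)) st
      = st.modify dim.toNat (fun p =>
          p.modify i.toNat (fun r =>
            (List.range K.toNat).foldl (fun r jn => r.set jn (f dim i (jn : Int))) r)) := by
    intro dim i st
    rw [List.foldl_map]
    simp only [assign3, Int.toNat_natCast]
    refine Eq.trans (pvFoldl_modify_const (List.range K.toNat) dim.toNat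
      (fun (p : List (List α)) (jn : Nat) =>
        p.modify i.toNat (fun r => r.set jn (f dim i (jn : Int)))) st) ?_
    congr 1
    funext p
    exact pvFoldl_modify_const (List.range K.toNat) i.toNat
      (fun (r : List α) (jn : Nat) => r.set jn (f dim i (jn : Int))) p
  have hbody : ∀ (dim : Int) (st : List (List (List α))),
      ((List.range K.toNat).map (fun t : Nat => (t : Int))).foldl (fun st i =>
        ((List.range K.toNat).map (fun t : Nat => (t : Int))).foldl (fun st j =>
          assign3 st dim i j (f dim i j)) st) st
      = st.modify dim.toNat (fun p =>
          (List.range K.toNat).foldl (fun p i =>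
            p.modify i (fun r =>
              (List.range K.toNat).foldl (fun r jn => r.set jn (f dim (i : Int) (jn : Int))) r)) p) := by
    intro dim st
    have h := PySem.List.foldl_congr_mem
      (l := (List.range K.toNat).map (fun t : Nat => (t : Int))) (init := st)
      (f := fun (st : List (List (List α))) (i : Int) =>
        ((List.range K.toNat).map (fun t : Nat => (t : Int))).foldl (fun st j =>
          assign3 st dim i j (f dim i j)) st)
      (g := fun (st : List (List (List α))) (i : Int) =>
        st.modify dim.toNat (fun p =>
          p.modify i.toNat (fun r =>
            (List.range K.toNat).foldl (fun r jn => r.set jn (f dim i (jn : Int))) r)))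
      (by intro acc x _; exact hj dim x acc)
    rw [h, List.foldl_map]
    refine Eq.trans (pvFoldl_modify_const (List.range K.toNat) dim.toNat
      (fun (p : List (List α)) (i : Nat) =>
        p.modify (Int.toNat (i : Int)) (fun r =>
          (List.range K.toNat).foldl (fun r jn => r.set jn (f dim (i : Int) (jn : Int))) r)) st) ?_
    simp only [Int.toNat_natCast]
  have h := PySem.List.foldl_congr_mem
    (l := (List.range D.toNat).map (fun t : Nat => (t : Int)))
    (init := ((List.range D.toNat).map (fun t : Nat => (t : Int))).map (fun _ =>
      ((List.range K.toNat).map (fun t : Nat => (t : Int))).map (fun _ =>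
        ((List.range K.toNat).map (fun t : Nat => (t : Int))).map (fun _ => z))))
    (f := fun (st : List (List (List α))) (dim : Int) =>
      ((List.range K.toNat).map (fun t : Nat => (t : Int))).foldl (fun st i =>
        ((List.range K.toNat).map (fun t : Nat => (t : Int))).foldl (fun st j =>
          assign3 st dim i j (f dim i j)) st) st)
    (g := fun (st : List (List (List α))) (dim : Int) =>
      st.modify dim.toNat (fun p =>
        (List.range K.toNat).foldl (fun p i =>
          p.modify i (fun r =>
            (List.range K.toNat).foldl (fun r jn => r.set jn (f dim (i : Int) (jn : Int))) r)) p))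
    (by intro acc x _; exact hbody x acc)
  rw [h, List.foldl_map]
  simp only [Int.toNat_natCast]
  apply List.ext_getElem
  · rw [pvFoldl_modify_range_length]; simp
  · intro t h1 h2
    rw [pvFoldl_modify_range_getElem]
    · have ht : t < D.toNat := by simpa using h2
      simp only [List.getElem_map, List.getElem_range, ht, if_pos]
      apply List.ext_getElem
      · rw [pvFoldl_modify_range_length]; simp
      · intro u h3 h4
        rw [pvFoldl_modify_range_getElem]
        · have hu : u < K.toNat := by simpa using h4
          simp only [List.getElem_map, List.getElem_range, hu, if_pos]
          have hset : ∀ (r : List α),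
              (List.range K.toNat).foldl (fun r jn => r.set jn (f (t : Int) (u : Int) (jn : Int))) r
              = (List.range K.toNat).foldl (fun r jn =>
                  r.modify jn (fun _ => f (t : Int) (u : Int) (jn : Int))) r := by
            intro r
            exact PySem.List.foldl_congr_mem
              (l := List.range K.toNat) (init := r)
              (f := fun (r : List α) (jn : Nat) => r.set jn (f (t : Int) (u : Int) (jn : Int)))
              (g := fun (r : List α) (jn : Nat) =>
                r.modify jn (fun _ => f (t : Int) (u : Int) (jn : Int)))
              (by intro acc x _; exact List.set_eq_modify _ _ _)
          rw [hset]
          apply List.ext_getElem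
          · rw [pvFoldl_modify_range_length]; simp
          · intro w h5 h6
            rw [pvFoldl_modify_range_getElem]
            · have hw : w < K.toNat := by simpa using h6
              simp [hw]
            · simpa using h6
        · simpa using h4
    · simpa using h2

theorem pvWindow_bound {n s iv kk : Int} (hs : 1 ≤ s)
    (hk : kk = PySem.Int.floordiv (n + s - 1) s) (hik : iv < kk) :
    iv * s < n := by
  have hbr := (PySem.Int.floordiv_eq_iff_of_pos (by omega : (0:Int) < s)).mp
    (hk.symm)
  nlinarith [hbr.1, hbr.2]

theorem pool_eq_alt (network : List (List (List Int))) (n d s : Int) (hs : 1 ≤ s) :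
    pool network n d s = pool_alt network n d s := by
  simp only [pool, pool_alt]
  have hprod : ∀ {β σ1 σ2 : Type} (f : σ1 → β → σ1) (g : σ2 → β → σ2) (l : List β)
      (p : σ1 × σ2), l.foldl (fun st e => (f st.1 e, g st.2 e)) p
        = (l.foldl f p.1, l.foldl g p.2) := by
    intro β σ1 σ2 f g l p
    obtain ⟨a, b⟩ := p
    exact PySem.List.foldl_prod_mk f g l a b
  set kk := PySem.Int.floordiv (n + s - 1) s with hk
  have hj : ∀ (dim i : Int) (st : List (List (List Int)) × List (List (List (List (Int × Int))))),
      (PySem.List.pyRange 0 kk).foldl (fun st j =>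
        (assign3 st.1 dim i j ((innerA network n s dim i j).1.getD 0),
         assign3 st.2 dim i j ((innerA network n s dim i j).2.getD []))) st
      = ((PySem.List.pyRange 0 kk).foldl (fun r j =>
            assign3 r dim i j ((innerA network n s dim i j).1.getD 0)) st.1,
         (PySem.List.pyRange 0 kk).foldl (fun r j =>
            assign3 r dim i j ((innerA network n s dim i j).2.getD [])) st.2) := by
    intro dim i st
    exact hprod (fun r j => assign3 r dim i j ((innerA network n s dim i j).1.getD 0))
      (fun r j => assign3 r dim i j ((innerA network n s dim i j).2.getD [])) _ st
  have hi : ∀ (dim : Int) (st : List (List (List Int)) × List (List (List (List (Int × Int))))),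
      (PySem.List.pyRange 0 kk).foldl (fun st i =>
        (PySem.List.pyRange 0 kk).foldl (fun st j =>
          (assign3 st.1 dim i j ((innerA network n s dim i j).1.getD 0),
           assign3 st.2 dim i j ((innerA network n s dim i j).2.getD []))) st) st
      = ((PySem.List.pyRange 0 kk).foldl (fun r i =>
            (PySem.List.pyRange 0 kk).foldl (fun r j =>
              assign3 r dim i j ((innerA network n s dim i j).1.getD 0)) r) st.1,
         (PySem.List.pyRange 0 kk).foldl (fun r i =>
            (PySem.List.pyRange 0 kk).foldl (fun r j =>
              assign3 r dim i j ((innerA network n s dim i j).2.getD [])) r) st.2) := by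
    intro dim st
    have h := PySem.List.foldl_congr_mem
      (l := PySem.List.pyRange 0 kk) (init := st)
      (f := fun (st : List (List (List Int)) × List (List (List (List (Int × Int))))) (i : Int) =>
        (PySem.List.pyRange 0 kk).foldl (fun st j =>
          (assign3 st.1 dim i j ((innerA network n s dim i j).1.getD 0),
           assign3 st.2 dim i j ((innerA network n s dim i j).2.getD []))) st)
      (g := fun (st : List (List (List Int)) × List (List (List (List (Int × Int))))) (i : Int) =>
        ((PySem.List.pyRange 0 kk).foldl (fun r j =>
            assign3 r dim i j ((innerA network n s dim i j).1.getD 0)) st.1,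
         (PySem.List.pyRange 0 kk).foldl (fun r j =>
            assign3 r dim i j ((innerA network n s dim i j).2.getD [])) st.2))
      (by intro acc x _; exact hj dim x acc)
    rw [h]
    exact hprod
      (fun r i => (PySem.List.pyRange 0 kk).foldl (fun r j =>
        assign3 r dim i j ((innerA network n s dim i j).1.getD 0)) r)
      (fun r i => (PySem.List.pyRange 0 kk).foldl (fun r j =>
        assign3 r dim i j ((innerA network n s dim i j).2.getD [])) r) _ st
  have hd := PySem.List.foldl_congr_mem
    (l := PySem.List.pyRange 0 d)
    (init := ((PySem.List.pyRange 0 d).map (fun _ =>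
        (PySem.List.pyRange 0 kk).map (fun _ =>
          (PySem.List.pyRange 0 kk).map (fun _ => (0 : Int)))),
      (PySem.List.pyRange 0 d).map (fun _ =>
        (PySem.List.pyRange 0 kk).map (fun _ =>
          (PySem.List.pyRange 0 kk).map (fun _ => ([] : List (Int × Int)))))))
    (f := fun (st : List (List (List Int)) × List (List (List (List (Int × Int))))) (dim : Int) =>
      (PySem.List.pyRange 0 kk).foldl (fun st i =>
        (PySem.List.pyRange 0 kk).foldl (fun st j =>
          (assign3 st.1 dim i j ((innerA network n s dim i j).1.getD 0),
           assign3 st.2 dim i j ((innerA network n s dim i j).2.getD []))) st) st)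
    (g := fun (st : List (List (List Int)) × List (List (List (List (Int × Int))))) (dim : Int) =>
      ((PySem.List.pyRange 0 kk).foldl (fun r i =>
          (PySem.List.pyRange 0 kk).foldl (fun r j =>
            assign3 r dim i j ((innerA network n s dim i j).1.getD 0)) r) st.1,
       (PySem.List.pyRange 0 kk).foldl (fun r i =>
          (PySem.List.pyRange 0 kk).foldl (fun r j =>
            assign3 r dim i j ((innerA network n s dim i j).2.getD [])) r) st.2))
    (by intro acc x _; exact hi x acc)
  rw [hd, hprod
    (fun r dim => (PySem.List.pyRange 0 kk).foldl (fun r i =>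
      (PySem.List.pyRange 0 kk).foldl (fun r j =>
        assign3 r dim i j ((innerA network n s dim i j).1.getD 0)) r) r)
    (fun r dim => (PySem.List.pyRange 0 kk).foldl (fun r i =>
      (PySem.List.pyRange 0 kk).foldl (fun r j =>
        assign3 r dim i j ((innerA network n s dim i j).2.getD [])) r) r)]
  simp only [Prod.mk.injEq]
  constructor
  · rw [pvComponent_eq d kk (fun dim i j => (innerA network n s dim i j).1.getD 0) 0]
    apply List.map_congr_left
    intro dim _
    apply List.map_congr_left
    intro i hi'
    apply List.map_congr_left
    intro j hj'
    rw [PySem.List.mem_pyRange_one] at hi' hj'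
    rw [pvInnerA_eq network n s dim i j hs
      (pvWindow_bound hs hk hi'.2) (pvWindow_bound hs hk hj'.2)]
    rfl
  · rw [pvComponent_eq d kk (fun dim i j => (innerA network n s dim i j).2.getD []) []]
    apply List.map_congr_left
    intro dim _
    apply List.map_congr_left
    intro i hi'
    apply List.map_congr_left
    intro j hj'
    rw [PySem.List.mem_pyRange_one] at hi' hj'
    rw [pvInnerA_eq network n s dim i j hs
      (pvWindow_bound hs hk hi'.2) (pvWindow_bound hs hk hj'.2)]
    rfl

-- degenerate inputs: no window columns (k ≤ 0) or no planes (d ≤ 0)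
theorem pool_eq_alt_deg (network : List (List (List Int))) (n d s : Int)
    (h : PySem.Int.floordiv (n + s - 1) s ≤ 0 ∨ d ≤ 0) :
    pool network n d s = pool_alt network n d s := by
  simp only [pool, pool_alt]
  rcases h with hk | hd
  · rw [pvPyRange_empty hk]
    simp
  · rw [pvPyRange_empty hd]
    simp

-- ===== VERDICT (by name: the statement is the Claim_ definition above) =====
theorem pool_spec : Claim_equal_pool := by
  intro network n d s _ hpre
  unfold Spec_pool
  show pool network n d s = pool_alt network n d s
  obtain ⟨hs0, hneg, _⟩ := hpre
  rcases lt_or_gt_of_ne hs0 with hlt | hgt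
  · exact pool_eq_alt_deg network n d s (hneg hlt)
  · exact pool_eq_alt network n d s (by omega)
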